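-- pv_equiv track=rewrite | github.com/PalindromeLeung/k | k-distribution/src/main/scripts/lib/pyk/util.py | findCommonItems
-- ===== SOURCE A (Python) =====
-- def findCommonItems(l1, l2):
--     common = []
--     for i in l1:
--         if i in l2:
--             common.append(i)
--     newL1 = []
--     newL2 = []
--     for i in l1:
--         if not i in common:
--             newL1.append(i)
--     for i in l2:
--         if not i in common:
--             newL2.append(i)
--     return (common, newL1, newL2)
-- ===== SOURCE B (Python) =====
-- def findCommonItems(l1, l2):
--     s2 = set(l2)
--     s1 = set(l1)
--     common = []
--     newL1 = []
--     for i in l1: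
--         if i in s2:
--             common.append(i)
--         else:
--             newL1.append(i)
--     newL2 = [i for i in l2 if i not in s1]
--     return (common, newL1, newL2)
-- ===== Notes on version B (the rewrite author's own statement) =====
-- stated objective: faster
-- what changed: One if/else pass over l1 with a precomputed set of l2 partitions it into common and newL1 at once, and newL2 is filtered against a set of l1 directly, replacing A's three passes with linear list scans ('i in l2', 'i in common') inside each.
import Mathlib
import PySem

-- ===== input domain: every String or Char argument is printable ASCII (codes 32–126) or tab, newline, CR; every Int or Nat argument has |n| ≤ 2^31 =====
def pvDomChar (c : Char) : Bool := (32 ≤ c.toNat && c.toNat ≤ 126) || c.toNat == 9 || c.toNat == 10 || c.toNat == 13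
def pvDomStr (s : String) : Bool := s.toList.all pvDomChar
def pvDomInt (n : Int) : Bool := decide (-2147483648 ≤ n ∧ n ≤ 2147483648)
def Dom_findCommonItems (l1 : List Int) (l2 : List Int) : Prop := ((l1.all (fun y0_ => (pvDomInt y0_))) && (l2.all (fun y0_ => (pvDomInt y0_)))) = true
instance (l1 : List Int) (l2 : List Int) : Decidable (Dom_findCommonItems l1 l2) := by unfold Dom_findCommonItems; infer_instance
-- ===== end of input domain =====

-- B partitions l1 in one if/else pass using a precomputed set of l2 and filters l2 against
-- a set of l1 directly instead of against the built 'common' list (objective: faster).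

-- ===== PORT A =====
def findCommonItems (l1 : List Int) (l2 : List Int) : List Int × List Int × List Int :=
  let common := l1.foldl (fun acc i => if i ∈ l2 then acc ++ [i] else acc) []
  let newL1 := l1.foldl (fun acc i => if ¬ i ∈ common then acc ++ [i] else acc) []
  let newL2 := l2.foldl (fun acc i => if ¬ i ∈ common then acc ++ [i] else acc) []
  (common, newL1, newL2)

-- ===== PORT B =====
def findCommonItems_alt (l1 : List Int) (l2 : List Int) : List Int × List Int × List Int :=
  let s2 : PySem.Set Int := PySem.Set.ofList l2
  let s1 : PySem.Set Int := PySem.Set.ofList l1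
  let p := l1.foldl (fun (p : List Int × List Int) i =>
      if PySem.Set.contains s2 i then (p.1 ++ [i], p.2) else (p.1, p.2 ++ [i])) ([], [])
  let newL2 := l2.filter (fun i => ¬ PySem.Set.contains s1 i)
  (p.1, p.2, newL2)

-- ===== PRECONDITION & SPEC =====
def Spec_findCommonItems (l1 : List Int) (l2 : List Int) (out : List Int × List Int × List Int) : Prop := out = findCommonItems_alt l1 l2
instance (l1 : List Int) (l2 : List Int) (out : List Int × List Int × List Int) : Decidable (Spec_findCommonItems l1 l2 out) := by unfold Spec_findCommonItems; infer_instance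

-- ===== CLAIM (what is proved, stated in full; the proofs are below) =====
def Claim_equal_findCommonItems : Prop := ∀ (l1 : List Int) (l2 : List Int), Dom_findCommonItems l1 l2 → Spec_findCommonItems l1 l2 (findCommonItems l1 l2)

-- ===== LEMMAS AND PROOFS =====

-- B's partition fold computes (filter, filter-of-negation), for any Bool test.
theorem partition_fold (p : Int → Bool) :
    ∀ (l1 : List Int) (c n : List Int),
      l1.foldl (fun (q : List Int × List Int) i =>
        if p i then (q.1 ++ [i], q.2) else (q.1, q.2 ++ [i])) (c, n)
      = (c ++ l1.filter p, n ++ l1.filter (fun i => ! p i)) := by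
  intro l1
  induction l1 with
  | nil => intro c n; simp
  | cons x xs ih =>
      intro c n
      by_cases h : p x <;> simp [List.foldl, h, ih, List.filter]

theorem contains_ofList (l : List Int) (i : Int) :
    PySem.Set.contains (PySem.Set.ofList l) i = decide (i ∈ l) := by
  simp [PySem.Set.mem_ofList]

theorem mem_common_iff (l1 l2 : List Int) (i : Int) (hi : i ∈ l1) :
    (i ∈ l1.filter (fun i => decide (i ∈ l2))) ↔ i ∈ l2 := by
  simp [List.mem_filter, hi]

theorem findCommonItems_spec_aux (l1 l2 : List Int) :
    findCommonItems l1 l2 = findCommonItems_alt l1 l2 := by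
  unfold findCommonItems findCommonItems_alt
  simp only [PySem.List.foldl_append_ite_eq_filter, List.nil_append, partition_fold,
    contains_ofList]
  refine Prod.ext ?_ (Prod.ext ?_ ?_)
  · rfl
  · simp only
    exact List.filter_congr (fun i hi => by
      simp [mem_common_iff l1 l2 i hi])
  · simp only
    exact List.filter_congr (fun i hi => by
      simp [List.mem_filter, hi])

-- ===== VERDICT (by name: the statement is the Claim_ definition above) =====
theorem findCommonItems_spec : Claim_equal_findCommonItems := by
  intro l1 l2 _
  exact findCommonItems_spec_aux l1 l2
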